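-- pv_equiv track=rewrite | github.com/acanino-innoit/log-processing-bq-cloud-func | main.py | extract_task_metrics
-- ===== SOURCE A (Python) =====
-- def extract_task_metrics(evaluation: list) -> dict:
--     total_tasks = len(evaluation)
--     in_scope = sum(1 for e in evaluation if e.get("in_scope"))
--     out_scope = total_tasks - in_scope
--
--     solved = sum(1 for e in evaluation if e.get("value") == "solved")
--     partially_solved = sum(1 for e in evaluation if e.get("value") == "partially_solved")
--     not_solved = sum(1 for e in evaluation if e.get("value") == "not_solved")
--
--     out_scope_not_solved = sum(1 for e in evaluation if not e.get("in_scope") and e.get("value") == "not_solved")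
--
--     return {
--         "total_tasks": total_tasks,
--         "in_scope_tasks": in_scope,
--         "out_scope_tasks": out_scope,
--         "solved_tasks": solved,
--         "partially_solved_tasks": partially_solved,
--         "not_solved_tasks": not_solved,
--         "out_scope_not_solved_tasks": out_scope_not_solved
--     }
-- ===== SOURCE B (Python) =====
-- def extract_task_metrics(evaluation: list) -> dict:
--     # single pass: maintain all counters at once instead of five scans
--     in_scope = solved = partially_solved = not_solved = out_scope_not_solved = 0
--     for e in evaluation:
--         scope = bool(e.get("in_scope"))
--         val = e.get("value")
--         if scope:
--             in_scope += 1
--         if val == "solved":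
--             solved += 1
--         elif val == "partially_solved":
--             partially_solved += 1
--         elif val == "not_solved":
--             not_solved += 1
--             if not scope:
--                 out_scope_not_solved += 1
--     total_tasks = len(evaluation)
--     return {
--         "total_tasks": total_tasks,
--         "in_scope_tasks": in_scope,
--         "out_scope_tasks": total_tasks - in_scope,
--         "solved_tasks": solved,
--         "partially_solved_tasks": partially_solved,
--         "not_solved_tasks": not_solved,
--         "out_scope_not_solved_tasks": out_scope_not_solved
--     }
-- ===== Notes on version B (the rewrite author's own statement) =====
-- stated objective: alternative
-- what changed: Replaces A's five independent sum-comprehension scans over the list with one fused loop that maintains all five counters in a single accumulator (with an if/elif chain on the value and out_scope derived as total - in_scope).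
import Mathlib
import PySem

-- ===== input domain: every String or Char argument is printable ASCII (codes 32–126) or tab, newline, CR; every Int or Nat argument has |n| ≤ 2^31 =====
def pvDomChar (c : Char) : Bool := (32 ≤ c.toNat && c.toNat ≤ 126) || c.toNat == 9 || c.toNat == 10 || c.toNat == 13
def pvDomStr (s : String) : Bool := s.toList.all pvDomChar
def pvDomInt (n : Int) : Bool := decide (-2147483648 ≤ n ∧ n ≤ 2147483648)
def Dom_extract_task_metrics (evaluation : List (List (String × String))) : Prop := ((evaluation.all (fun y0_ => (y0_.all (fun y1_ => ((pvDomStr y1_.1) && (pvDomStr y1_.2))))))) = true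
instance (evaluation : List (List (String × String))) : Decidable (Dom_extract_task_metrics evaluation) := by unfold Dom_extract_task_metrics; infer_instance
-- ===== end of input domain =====

-- B fuses A's five sum-comprehension scans into one accumulator loop; equivalence of return values proved (alternative decomposition, not claimed faster).

-- ===== PORT A =====
-- each 'sum(1 for e in evaluation if cond)' is a countP over the same list; e.get(k) = Dict.get? ⟨e⟩ k; truthiness of the string value = nonempty
def extract_task_metrics (evaluation : List (List (String × String))) : List (String × Int) :=
  let total_tasks : Int := (evaluation.length : Int)
  let in_scope : Int :=
    ((evaluation.countP (fun e =>
      match PySem.Dict.get? ⟨e⟩ "in_scope" with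
      | some s => s != ""
      | none => false) : Nat) : Int)
  let out_scope : Int := total_tasks - in_scope
  let solved : Int :=
    ((evaluation.countP (fun e => PySem.Dict.get? ⟨e⟩ "value" == some "solved") : Nat) : Int)
  let partially_solved : Int :=
    ((evaluation.countP (fun e => PySem.Dict.get? ⟨e⟩ "value" == some "partially_solved") : Nat) : Int)
  let not_solved : Int :=
    ((evaluation.countP (fun e => PySem.Dict.get? ⟨e⟩ "value" == some "not_solved") : Nat) : Int)
  let out_scope_not_solved : Int :=
    ((evaluation.countP (fun e =>
      (!(match PySem.Dict.get? ⟨e⟩ "in_scope" with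
         | some s => s != ""
         | none => false)) && (PySem.Dict.get? ⟨e⟩ "value" == some "not_solved")) : Nat) : Int)
  [("total_tasks", total_tasks),
   ("in_scope_tasks", in_scope),
   ("out_scope_tasks", out_scope),
   ("solved_tasks", solved),
   ("partially_solved_tasks", partially_solved),
   ("not_solved_tasks", not_solved),
   ("out_scope_not_solved_tasks", out_scope_not_solved)]

-- ===== PORT B =====
-- scope = bool(e.get("in_scope")): a present value is truthy iff it is a nonempty string
def pvScope (e : List (String × String)) : Bool :=
  match PySem.Dict.get? ⟨e⟩ "in_scope" with
  | some s => s != ""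
  | none => false

-- one loop step of B: updates (in_scope, solved, partially_solved, not_solved, out_scope_not_solved)
def pvStep (acc : Int × Int × Int × Int × Int) (e : List (String × String)) :
    Int × Int × Int × Int × Int :=
  let scope := pvScope e
  let val := PySem.Dict.get? ⟨e⟩ "value"
  let (i, s, p, n, o) := acc
  let i := if scope then i + 1 else i
  if val == some "solved" then (i, s + 1, p, n, o)
  else if val == some "partially_solved" then (i, s, p + 1, n, o)
  else if val == some "not_solved" then (i, s, p, n + 1, if scope then o else o + 1)
  else (i, s, p, n, o)

def extract_task_metrics_alt (evaluation : List (List (String × String))) : List (String × Int) :=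
  let r := evaluation.foldl pvStep (0, 0, 0, 0, 0)
  let total_tasks : Int := (evaluation.length : Int)
  [("total_tasks", total_tasks),
   ("in_scope_tasks", r.1),
   ("out_scope_tasks", total_tasks - r.1),
   ("solved_tasks", r.2.1),
   ("partially_solved_tasks", r.2.2.1),
   ("not_solved_tasks", r.2.2.2.1),
   ("out_scope_not_solved_tasks", r.2.2.2.2)]

-- ===== PRECONDITION & SPEC =====
def Spec_extract_task_metrics (evaluation : List (List (String × String))) (out : List (String × Int)) : Prop := out = extract_task_metrics_alt evaluation
instance (evaluation : List (List (String × String))) (out : List (String × Int)) : Decidable (Spec_extract_task_metrics evaluation out) := by unfold Spec_extract_task_metrics; infer_instance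

-- ===== CLAIM (what is proved, stated in full; the proofs are below) =====
def Claim_equal_extract_task_metrics : Prop := ∀ (evaluation : List (List (String × String))), Dom_extract_task_metrics evaluation → Spec_extract_task_metrics evaluation (extract_task_metrics evaluation)

-- ===== LEMMAS AND PROOFS =====

-- the fold's components are exactly A's five counts, shifted by the initial accumulator
lemma pvFold_eq (xs : List (List (String × String))) (i s p n o : Int) :
    xs.foldl pvStep (i, s, p, n, o) =
      (i + ((xs.countP (fun e => pvScope e) : Nat) : Int),
       s + ((xs.countP (fun e => PySem.Dict.get? ⟨e⟩ "value" == some "solved") : Nat) : Int),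
       p + ((xs.countP (fun e => PySem.Dict.get? ⟨e⟩ "value" == some "partially_solved") : Nat) : Int),
       n + ((xs.countP (fun e => PySem.Dict.get? ⟨e⟩ "value" == some "not_solved") : Nat) : Int),
       o + ((xs.countP (fun e => !(pvScope e) && (PySem.Dict.get? ⟨e⟩ "value" == some "not_solved")) : Nat) : Int)) := by
  induction xs generalizing i s p n o with
  | nil => simp
  | cons e xs ih =>
    simp only [List.foldl_cons, List.countP_cons, pvStep]
    by_cases hs : pvScope e <;>
    by_cases h1 : PySem.Dict.get? ⟨e⟩ "value" = some "solved" <;>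
    by_cases h2 : PySem.Dict.get? ⟨e⟩ "value" = some "partially_solved" <;>
    by_cases h3 : PySem.Dict.get? ⟨e⟩ "value" = some "not_solved" <;>
    simp only [hs, h1, h2, h3, beq_iff_eq, Bool.not_true, Bool.not_false, Bool.false_and,
      Bool.true_and, if_true, if_false, ih,
      Prod.mk.injEq] <;>
    (try simp_all) <;> omega

theorem extract_task_metrics_spec_aux (evaluation : List (List (String × String))) :
    extract_task_metrics evaluation = extract_task_metrics_alt evaluation := by
  unfold extract_task_metrics extract_task_metrics_alt
  rw [pvFold_eq]
  simp [pvScope]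

-- ===== VERDICT (by name: the statement is the Claim_ definition above) =====
theorem extract_task_metrics_spec : Claim_equal_extract_task_metrics := by
  intro ev _
  exact extract_task_metrics_spec_aux ev
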